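-- pv_equiv track=rewrite | github.com/LectureHubTeam/codemath-skills | skills/cp-solver/references/implementations/digit-dp/digit_dp.py | count_without_digit
-- ===== SOURCE A (Python) =====
-- from functools import lru_cache
--
-- def count_without_digit(N, forbidden_digit):
--     """
--     Đếm số trong [1..N] không chứa chữ số 'forbidden_digit'
--     """
--     s = str(N)
--     n = len(s)
--
--     @lru_cache(maxsize=None)
--     def dp(pos, tight, leading_zero):
--         if pos == n:
--             return 0 if leading_zero else 1
--
--         result = 0
--         limit = int(s[pos]) if tight else 9
--
--         for digit in range(0, limit + 1):
--             if digit == forbidden_digit and not (leading_zero and digit == 0):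
--                 continue  # Skip forbidden digit (allow leading zero = 0)
--             new_tight = tight and (digit == limit)
--             new_leading = leading_zero and (digit == 0)
--             result += dp(pos + 1, new_tight, new_leading)
--
--         return result
--
--     return dp(0, True, True)
-- ===== SOURCE B (Python) =====
-- def count_without_digit(N, forbidden_digit):
--     """Count integers in [1..N] whose decimal representation lacks forbidden_digit.
--
--     Iterative combinatorial digit count instead of memoized recursion.
--     """
--     if N == 0:
--         return 0
--     digits = [int(c) for c in str(N)]
--     n = len(digits)
--     f = forbidden_digit
--     A = 9 if 0 <= f <= 9 else 10          # allowed digits among 0..9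
--     lead = A - 1 if 0 <= f <= 9 and f != 0 else 9   # allowed leading digits among 1..9
--     # all valid numbers with fewer digits than N
--     total = 0
--     for L in range(1, n):
--         total += lead * A ** (L - 1)
--     # numbers with exactly n digits, scanning N's digits while the prefix is tight
--     for i, d in enumerate(digits):
--         lo = 1 if i == 0 else 0
--         cnt = max(0, d - lo)
--         if lo <= f < d:
--             cnt -= 1
--         total += cnt * A ** (n - 1 - i)
--         if d == f:
--             break
--     else:
--         total += 1   # N itself is valid
--     return total
-- ===== Notes on version B (the rewrite author's own statement) =====
-- stated objective: simpler
-- what changed: Replaced the memoized tight/leading-zero digit-DP recursion by a direct two-pass combinatorial count: sum over shorter lengths plus a single left-to-right tight scan of N's digits.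
import Mathlib
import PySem

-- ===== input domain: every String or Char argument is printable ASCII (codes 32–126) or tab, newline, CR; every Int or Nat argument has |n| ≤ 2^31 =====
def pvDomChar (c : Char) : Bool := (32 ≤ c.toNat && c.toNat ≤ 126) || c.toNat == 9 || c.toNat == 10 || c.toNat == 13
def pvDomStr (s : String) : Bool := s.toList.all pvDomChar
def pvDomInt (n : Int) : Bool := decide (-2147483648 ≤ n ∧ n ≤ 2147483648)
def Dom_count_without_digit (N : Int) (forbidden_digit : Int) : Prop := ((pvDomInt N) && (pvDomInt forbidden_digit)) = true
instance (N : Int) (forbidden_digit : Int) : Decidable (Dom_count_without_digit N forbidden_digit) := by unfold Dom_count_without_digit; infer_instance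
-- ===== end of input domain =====

-- B replaces A's memoized digit-DP recursion by a direct two-pass combinatorial count (simpler, no memo table).

-- ===== PORT A =====
-- int(c) for a one-character string c (both Pythons apply int to single characters of str(N);
-- exact via PySem.Int.ofChars?; its none case is the '-' of a negative N, excluded by Pre_)
def pvDval (c : Char) : Int := (PySem.Int.ofChars? [c]).getD 0

-- lru_cache: the dp cache, keyed like Python's (pos, tight, leading_zero); pos is
-- represented by the length of the remaining suffix (same bijection, s is fixed per call)
def pvDpAMemo (f : Int) : List Char → Bool → Bool → PySem.Dict (Int × Bool × Bool) Int →
    Int × PySem.Dict (Int × Bool × Bool) Int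
  | [], tight, leading, cache =>
    match cache.get? (((List.length ([] : List Char) : Nat) : Int), tight, leading) with
    | some v => (v, cache)
    | none =>
      let v : Int := if leading then 0 else 1
      (v, cache.insert (((List.length ([] : List Char) : Nat) : Int), tight, leading) v)
  | c :: rest, tight, leading, cache =>
    match cache.get? (((c :: rest).length : Int), tight, leading) with
    | some v => (v, cache)
    | none =>
      let limit : Int := if tight then pvDval c else 9
      let p := (PySem.List.pyRange 0 (limit + 1) 1).foldl
        (fun (acc : Int × PySem.Dict (Int × Bool × Bool) Int) digit =>
          if digit == f && !(leading && digit == 0) then acc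
          else
            let r := pvDpAMemo f rest (tight && digit == limit) (leading && digit == 0) acc.2
            (acc.1 + r.1, r.2)) (0, cache)
      (p.1, p.2.insert (((c :: rest).length : Int), tight, leading) p.1)

def count_without_digit (N : Int) (forbidden_digit : Int) : Int :=
  (pvDpAMemo forbidden_digit (PySem.Int.toChars N) true true PySem.Dict.empty).1

-- ===== PORT B =====
-- the tight left-to-right scan of Source B (for ... break / else over enumerate(digits)); i is the enumerate index
def pvScanB (f A : Int) : List Int → Int → Int
  | [], _ => 1
  | d :: rest, i =>
    let lo : Int := if i == 0 then 1 else 0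
    let cnt : Int := max 0 (d - lo) - (if lo ≤ f ∧ f < d then 1 else 0)
    cnt * A ^ rest.length + (if d == f then 0 else pvScanB f A rest (i + 1))

def count_without_digit_alt (N : Int) (forbidden_digit : Int) : Int :=
  if N == 0 then 0 else
  let ds : List Int := (PySem.Int.toChars N).map pvDval
  let n : Int := ds.length
  let A : Int := if 0 ≤ forbidden_digit ∧ forbidden_digit ≤ 9 then 9 else 10
  let lead : Int := if (0 ≤ forbidden_digit ∧ forbidden_digit ≤ 9) ∧ forbidden_digit ≠ 0 then A - 1 else 9
  let total : Int := (PySem.List.pyRange 1 n 1).foldl (fun t L => t + lead * A ^ (L - 1).toNat) 0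
  total + pvScanB forbidden_digit A ds 0

-- ===== PRECONDITION & SPEC =====
-- Pre_ excludes N < 0: there str(N) starts with '-' and int(s[0]) raises ValueError in A (and B raises the same way).
def Pre_count_without_digit (N : Int) (forbidden_digit : Int) : Prop := 0 ≤ N
instance (N : Int) (forbidden_digit : Int) : Decidable (Pre_count_without_digit N forbidden_digit) := by unfold Pre_count_without_digit; infer_instance
def pvWitness_count_without_digit : Int × Int := (25, 3)

def Spec_count_without_digit (N : Int) (forbidden_digit : Int) (out : Int) : Prop := out = count_without_digit_alt N forbidden_digit
instance (N : Int) (forbidden_digit : Int) (out : Int) : Decidable (Spec_count_without_digit N forbidden_digit out) := by unfold Spec_count_without_digit; infer_instance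

-- ===== CLAIM (what is proved, stated in full; the proofs are below) =====
def Claim_equal_count_without_digit : Prop := ∀ (N : Int) (forbidden_digit : Int), Dom_count_without_digit N forbidden_digit → Pre_count_without_digit N forbidden_digit → Spec_count_without_digit N forbidden_digit (count_without_digit N forbidden_digit)

-- ===== LEMMAS AND PROOFS =====

-- the reference (unmemoized) dp value: same recursion as pvDpAMemo, no cache
def pvDpA (f : Int) : List Char → Bool → Bool → Int
  | [], _, leading => if leading then 0 else 1
  | c :: rest, tight, leading =>
    let limit : Int := if tight then pvDval c else 9
    (PySem.List.pyRange 0 (limit + 1) 1).foldl (fun result digit =>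
      if digit == f && !(leading && digit == 0) then result
      else result + pvDpA f rest (tight && digit == limit) (leading && digit == 0)) 0

-- msd-first decimal digit list of a natural number
def pvDigits (m : Nat) : List Nat :=
  if h : m < 10 then [m] else pvDigits (m / 10) ++ [m % 10]
decreasing_by exact Nat.div_lt_self (by omega) (by omega)

-- allowed-digit count, allowed-leading-digit count (the A and lead of Source B) and the geometric sum
def pvA (f : Int) : Int := if 0 ≤ f ∧ f ≤ 9 then 9 else 10
def pvLead (f : Int) : Int := if (0 ≤ f ∧ f ≤ 9) ∧ f ≠ 0 then pvA f - 1 else 9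
def pvG (A : Int) (k : Nat) : Int := ((List.range k).map (A ^ ·)).sum

theorem pvToDigitsCore_eq (m : Nat) : ∀ (fuel : Nat) (acc : List Char), m < fuel →
    Nat.toDigitsCore 10 fuel m acc = (pvDigits m).map Nat.digitChar ++ acc := by
  induction m using Nat.strong_induction_on with
  | _ m ih =>
    intro fuel acc hf
    match fuel with
    | fuel + 1 =>
      rw [Nat.toDigitsCore]
      by_cases h0 : m / 10 = 0
      · simp only [h0, if_pos rfl]
        rw [pvDigits]
        have hm : m < 10 := by omega
        rw [dif_pos hm]
        simp [Nat.mod_eq_of_lt hm]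
      · rw [if_neg h0]
        have h10 : 10 ≤ m := by
          by_contra h; push_neg at h; simp [Nat.div_eq_of_lt h] at h0
        have hlt : m / 10 < m := Nat.div_lt_self (by omega) (by omega)
        rw [ih (m / 10) hlt fuel _ (by omega)]
        conv_rhs => rw [pvDigits]
        rw [dif_neg (by omega)]
        simp

theorem pvToChars_eq (N : Int) (h : 0 ≤ N) :
    PySem.Int.toChars N = (pvDigits N.toNat).map Nat.digitChar := by
  rw [PySem.Int.toChars, if_neg (by omega)]
  rw [Nat.toDigits, pvToDigitsCore_eq N.toNat (N.toNat + 1) [] (by omega)]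
  simp

theorem pvDigits_lt (m : Nat) : ∀ d ∈ pvDigits m, d < 10 := by
  induction m using Nat.strong_induction_on with
  | _ m ih =>
    rw [pvDigits]
    by_cases hm : m < 10
    · simp [hm]
    · rw [dif_neg hm]
      intro d hd
      rcases List.mem_append.1 hd with h' | h'
      · exact ih (m / 10) (Nat.div_lt_self (by omega) (by omega)) d h'
      · simp at h'; omega

theorem pvDigits_shape (m : Nat) (h : 0 < m) :
    ∃ d rest, pvDigits m = d :: rest ∧ 1 ≤ d ∧ d < 10 := by
  induction m using Nat.strong_induction_on with
  | _ m ih =>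
    rw [pvDigits]
    by_cases hm : m < 10
    · exact ⟨m, [], by simp [hm], by omega, hm⟩
    · rw [dif_neg hm]
      obtain ⟨d, rest, heq, h1, h9⟩ :=
        ih (m / 10) (Nat.div_lt_self (by omega) (by omega)) (by
          have := Nat.div_le_div_right (c := 10) (show 10 ≤ m by omega); omega)
      exact ⟨d, rest ++ [m % 10], by rw [heq]; simp, h1, h9⟩

theorem pvDval_digitChar (d : Nat) (h : d < 10) : pvDval (Nat.digitChar d) = (d : Int) := by
  interval_cases d <;> decide

theorem pvFoldl_skip (l : List Int) (p : Int → Bool) (g : Int → Int) (init : Int) :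
    l.foldl (fun r d => if p d then r else r + g d) init = init + (l.map (fun d => if p d then 0 else g d)).sum := by
  induction l generalizing init with
  | nil => simp
  | cons x xs ih =>
    simp only [List.foldl_cons, List.map_cons, List.sum_cons, ih]
    by_cases hp : p x <;> simp [hp] <;> ring

theorem pvSum_if_const (l : List Int) (f X : Int) :
    (l.map (fun d => if d == f then 0 else X)).sum = ((l.countP (fun d => d != f) : Nat) : Int) * X := by
  induction l with
  | nil => simp
  | cons x xs ih =>
    simp only [List.map_cons, List.sum_cons, List.countP_cons, ih]
    by_cases hx : x = f <;> simp [hx] <;> push_cast <;> ring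

theorem pvG_succ (A : Int) (k : Nat) : pvG A (k + 1) = pvG A k + A ^ k := by
  simp [pvG, List.range_succ]

theorem pvCount (a b f : Int) (hab : a ≤ b) :
    (((PySem.List.pyRange a b 1).countP (fun d => d != f) : Nat) : Int)
      = (b - a) - (if a ≤ f ∧ f < b then 1 else 0) := by
  obtain ⟨k, hk⟩ : ∃ k : Nat, b = a + k := ⟨(b - a).toNat, by omega⟩
  subst hk
  induction k with
  | zero => simp [PySem.List.pyRange_one_eq_nil (by omega : a + (0:Nat) ≤ a)]
  | succ k ih =>
    have h1 : a ≤ a + (k : Int) := by omega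
    rw [show (a + ((k + 1 : Nat) : Int)) = (a + k) + 1 by push_cast; ring,
        PySem.List.pyRange_one_succ_right h1]
    rw [List.countP_append]
    push_cast
    rw [ih h1]
    simp only [List.countP_cons, List.countP_nil]
    by_cases hf : (a + (k:Int)) = f <;> simp [hf, bne] <;> split_ifs <;> push_cast <;> omega

theorem pvDpA_FF (f : Int) (ds : List Nat) :
    pvDpA f (ds.map Nat.digitChar) false false = pvA f ^ ds.length := by
  induction ds with
  | nil => simp [pvDpA]
  | cons d rest ih =>
    simp only [List.map_cons, pvDpA, Bool.false_and, Bool.not_false, Bool.and_true,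
      if_neg (by decide : ¬(false = true))]
    rw [pvFoldl_skip _ (fun digit => digit == f) (fun _ => pvDpA f (rest.map Nat.digitChar) false false)]
    rw [pvSum_if_const, pvCount 0 (9+1) f (by omega), ih]
    simp only [List.length_cons, pvA]
    split_ifs with h h' <;> first | omega | (rw [pow_succ]; ring)

theorem pvDpA_FT (f : Int) (ds : List Nat) :
    pvDpA f (ds.map Nat.digitChar) false true = pvLead f * pvG (pvA f) ds.length := by
  induction ds with
  | nil => simp [pvDpA, pvG]
  | cons d rest ih =>
    simp only [List.map_cons, pvDpA, Bool.false_and, Bool.true_and,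
      if_neg (by decide : ¬(false = true))]
    rw [pvFoldl_skip _ (fun digit => digit == f && !(digit == 0))
      (fun digit => pvDpA f (rest.map Nat.digitChar) false (digit == 0))]
    rw [PySem.List.pyRange_one_append 0 1 (9+1) (by omega) (by omega),
      List.map_append, List.sum_append,
      show PySem.List.pyRange 0 1 1 = [0] from PySem.List.pyRange_one_singleton 0]
    have h2 : ((PySem.List.pyRange 1 (9+1) 1).map
        (fun digit => if digit == f && !(digit == 0) then 0
          else pvDpA f (rest.map Nat.digitChar) false (digit == 0))).sum
        = ((PySem.List.pyRange 1 (9+1) 1).map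
        (fun digit => if digit == f then 0 else pvA f ^ rest.length)).sum := by
      apply congrArg
      apply List.map_congr_left
      intro e he
      rw [PySem.List.mem_pyRange_one] at he
      have he0 : (e == 0) = false := by simp; omega
      rw [he0]
      simp only [Bool.not_false, Bool.and_true]
      rw [pvDpA_FF]
    rw [h2, pvSum_if_const, pvCount 1 (9+1) f (by omega)]
    have hl : (9 + 1 - 1 : Int) - (if 1 ≤ f ∧ f < 9+1 then 1 else 0) = pvLead f := by
      simp only [pvLead, pvA]; split_ifs <;> omega
    simp only [List.map_cons, List.map_nil, List.sum_cons, List.sum_nil,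
      beq_self_eq_true, Bool.not_true, Bool.and_false, List.length_cons, pvG_succ,
      if_neg (by decide : ¬(false = true))]
    rw [ih, hl]
    ring

theorem pvDpA_TF (f : Int) (ds : List Nat) (h : ∀ d ∈ ds, d < 10) :
    ∀ i : Int, 1 ≤ i →
    pvDpA f (ds.map Nat.digitChar) true false = pvScanB f (pvA f) (ds.map (Nat.cast : Nat → Int)) i := by
  induction ds with
  | nil => intro i hi; simp [pvDpA, pvScanB]
  | cons d rest ih =>
    intro i hi
    have hd : d < 10 := h d (by simp)
    simp only [List.map_cons, pvDpA, Bool.false_and, Bool.true_and, Bool.and_false,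
      Bool.not_false, Bool.and_true, if_true, pvDval_digitChar d hd]
    rw [pvFoldl_skip _ (fun digit => digit == f)
      (fun digit => pvDpA f (rest.map Nat.digitChar) (digit == (d : Int)) false)]
    rw [PySem.List.pyRange_one_succ_right (by omega : (0:Int) ≤ (d:Int)),
      List.map_append, List.sum_append, List.map_cons, List.map_nil]
    have h2 : ((PySem.List.pyRange 0 (d:Int) 1).map
        (fun digit => if digit == f then 0
          else pvDpA f (rest.map Nat.digitChar) (digit == (d:Int)) false)).sum
        = ((PySem.List.pyRange 0 (d:Int) 1).map
        (fun digit => if digit == f then 0 else pvA f ^ rest.length)).sum := by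
      apply congrArg
      apply List.map_congr_left
      intro e he
      rw [PySem.List.mem_pyRange_one] at he
      have hed : (e == (d:Int)) = false := by simp; omega
      rw [hed, pvDpA_FF]
    rw [h2, pvSum_if_const, pvCount 0 (d:Int) f (by omega)]
    simp only [beq_self_eq_true, List.sum_cons, List.sum_nil, if_pos rfl]
    rw [ih (fun e he => h e (by simp [he])) (i+1) (by omega)]
    rw [pvScanB]
    have hi0 : (i == 0) = false := by simp; omega
    simp only [hi0, if_neg (by decide : ¬(false = true))]
    have hmax : max 0 ((d:Int) - 0) = (d:Int) := by omega
    rw [hmax]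
    simp only [List.length_map]
    by_cases hdf : (d:Int) = f
    · simp [hdf]
    · have : ((d:Int) == f) = false := by simp [hdf]
      simp only [this, if_neg (by decide : ¬(false = true))]
      ring

theorem pvDpA_root (f : Int) (d : Nat) (rest : List Nat) (hd1 : 1 ≤ d) (hd9 : d < 10)
    (h : ∀ e ∈ rest, e < 10) :
    pvDpA f ((d :: rest).map Nat.digitChar) true true
      = pvLead f * pvG (pvA f) rest.length
        + pvScanB f (pvA f) ((d :: rest).map (Nat.cast : Nat → Int)) 0 := by
  simp only [List.map_cons, pvDpA, Bool.true_and, if_true, pvDval_digitChar d hd9]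
  rw [pvFoldl_skip _ (fun digit => digit == f && !(digit == 0))
    (fun digit => pvDpA f (rest.map Nat.digitChar) (digit == (d : Int)) (digit == 0))]
  rw [PySem.List.pyRange_one_succ_right (by omega : (0:Int) ≤ (d:Int)),
    PySem.List.pyRange_one_append 0 1 (d:Int) (by omega) (by omega),
    List.map_append, List.map_append, List.sum_append, List.sum_append,
    show PySem.List.pyRange 0 1 1 = [0] from PySem.List.pyRange_one_singleton 0]
  have h2 : ((PySem.List.pyRange 1 (d:Int) 1).map
      (fun digit => if digit == f && !(digit == 0) then 0
        else pvDpA f (rest.map Nat.digitChar) (digit == (d:Int)) (digit == 0))).sum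
      = ((PySem.List.pyRange 1 (d:Int) 1).map
      (fun digit => if digit == f then 0 else pvA f ^ rest.length)).sum := by
    apply congrArg
    apply List.map_congr_left
    intro e he
    rw [PySem.List.mem_pyRange_one] at he
    have he0 : (e == 0) = false := by simp; omega
    have hed : (e == (d:Int)) = false := by simp; omega
    rw [he0, hed]
    simp only [Bool.not_false, Bool.and_true]
    rw [pvDpA_FF]
  rw [h2, pvSum_if_const, pvCount 1 (d:Int) f (by omega)]
  have hd0 : ((d:Int) == 0) = false := by simp; omega
  have h0d : ((0:Int) == (d:Int)) = false := by simp; omega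
  simp only [h0d, List.map_cons, List.map_nil, List.sum_cons, List.sum_nil,
    beq_self_eq_true, Bool.not_true, Bool.and_false, hd0, Bool.not_false, Bool.and_true,
    if_neg (by decide : ¬(false = true))]
  rw [pvDpA_FT, pvDpA_TF f rest h 1 (by omega)]
  rw [pvScanB]
  simp only [show ((0:Int) == 0) = true from rfl, if_true, List.length_map]
  have hmax : max 0 ((d:Int) - 1) = (d:Int) - 1 := by omega
  rw [hmax]
  by_cases hdf : (d:Int) = f
  · simp [hdf]
  · have : ((d:Int) == f) = false := by simp [hdf]
    simp only [this, if_neg (by decide : ¬(false = true))]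
    ring

theorem pvLoop1 (lead A : Int) (k : Nat) :
    (PySem.List.pyRange 1 (1 + (k : Int)) 1).foldl (fun t L => t + lead * A ^ (L - 1).toNat) 0
      = lead * pvG A k := by
  induction k with
  | zero => simp [PySem.List.pyRange_one_eq_nil (by omega : (1:Int) + (0:Nat) ≤ 1), pvG]
  | succ k ih =>
    rw [show ((1:Int) + ((k + 1 : Nat) : Int)) = (1 + (k:Int)) + 1 by push_cast; ring,
      PySem.List.pyRange_one_succ_right (by omega : (1:Int) ≤ 1 + (k:Int)),
      List.foldl_append, ih]
    simp only [List.foldl_cons, List.foldl_nil, pvG_succ]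
    have : ((1:Int) + (k:Int) - 1).toNat = k := by omega
    rw [this]
    ring

-- a cache is valid if every entry is the corresponding dp value (suffixes of s are determined by length)
def pvValid (f : Int) (s : List Char) (cache : PySem.Dict (Int × Bool × Bool) Int) : Prop :=
  ∀ (r : List Char) (t l : Bool) (v : Int), r <:+ s →
    cache.get? ((r.length : Int), t, l) = some v → v = pvDpA f r t l

theorem pvSuffix_eq_of_length {r1 r2 s : List Char} (h1 : r1 <:+ s) (h2 : r2 <:+ s)
    (h : r1.length = r2.length) : r1 = r2 := by
  obtain ⟨a, rfl⟩ := h1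
  obtain ⟨b, hb⟩ := h2
  have hl : a.length = b.length := by
    have := congrArg List.length hb; simp at this ⊢; omega
  exact (List.append_inj_right hb hl.symm).symm

theorem pvDpAMemo_correct (f : Int) (s : List Char) : ∀ (r : List Char), r <:+ s →
    ∀ (t l : Bool) (cache : PySem.Dict (Int × Bool × Bool) Int), pvValid f s cache →
    (pvDpAMemo f r t l cache).1 = pvDpA f r t l ∧ pvValid f s (pvDpAMemo f r t l cache).2 := by
  intro r
  induction r with
  | nil =>
    intro hsuf t l cache hval
    rw [pvDpAMemo]
    cases hc : cache.get? (((List.length ([] : List Char) : Nat) : Int), t, l) with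
    | some v =>
      simp only
      exact ⟨hval [] t l v hsuf hc, hval⟩
    | none =>
      simp only
      constructor
      · simp [pvDpA]
      · intro r' t' l' v' hsuf' hget
        by_cases hk : ((r'.length : Int), t', l') = (((List.length ([] : List Char) : Nat) : Int), t, l)
        · obtain ⟨hk1, rfl, rfl⟩ : ((r'.length : Int) = ((List.length ([] : List Char) : Nat) : Int)) ∧ t' = t ∧ l' = l := by
            simpa [Prod.ext_iff] using hk
          have hr' : r' = [] := pvSuffix_eq_of_length hsuf' hsuf (by exact_mod_cast hk1)
          rw [hr', PySem.Dict.get?_insert_self] at hget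
          cases hget
          rw [hr']
          simp [pvDpA]
        · rw [PySem.Dict.get?_insert_of_ne _ _ hk] at hget
          exact hval r' t' l' v' hsuf' hget
  | cons c rest ih =>
    intro hsuf t l cache hval
    have hrsuf : rest <:+ s := (List.suffix_cons c rest).trans hsuf
    rw [pvDpAMemo]
    cases hc : cache.get? ((((c :: rest).length : Nat) : Int), t, l) with
    | some v =>
      simp only
      exact ⟨hval (c :: rest) t l v hsuf hc, hval⟩
    | none =>
      simp only
      have haux : ∀ (dl : List Int) (acc : Int × PySem.Dict (Int × Bool × Bool) Int),
          pvValid f s acc.2 →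
          (dl.foldl (fun (acc : Int × PySem.Dict (Int × Bool × Bool) Int) digit =>
            if digit == f && !(l && digit == 0) then acc
            else
              let r := pvDpAMemo f rest (t && digit == (if t then pvDval c else 9)) (l && digit == 0) acc.2
              (acc.1 + r.1, r.2)) acc).1
            = dl.foldl (fun (result : Int) digit =>
                if digit == f && !(l && digit == 0) then result
                else result + pvDpA f rest (t && digit == (if t then pvDval c else 9)) (l && digit == 0)) acc.1
          ∧ pvValid f s (dl.foldl (fun (acc : Int × PySem.Dict (Int × Bool × Bool) Int) digit =>
            if digit == f && !(l && digit == 0) then acc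
            else
              let r := pvDpAMemo f rest (t && digit == (if t then pvDval c else 9)) (l && digit == 0) acc.2
              (acc.1 + r.1, r.2)) acc).2 := by
        intro dl
        induction dl with
        | nil => intro acc h; exact ⟨rfl, h⟩
        | cons dg dl ihd =>
          intro acc hacc
          simp only [List.foldl_cons]
          by_cases hskip : (dg == f && !(l && dg == 0)) = true
          · rw [if_pos hskip, if_pos hskip]
            exact ihd acc hacc
          · rw [if_neg hskip, if_neg hskip]
            obtain ⟨h1, h2⟩ := ih hrsuf (t && dg == (if t then pvDval c else 9)) (l && dg == 0) acc.2 hacc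
            obtain ⟨h3, h4⟩ := ihd (acc.1 + (pvDpAMemo f rest (t && dg == (if t then pvDval c else 9)) (l && dg == 0) acc.2).1,
              (pvDpAMemo f rest (t && dg == (if t then pvDval c else 9)) (l && dg == 0) acc.2).2) h2
            exact ⟨by rw [h3]; simp only [h1], h4⟩
      obtain ⟨h1, h2⟩ := haux (PySem.List.pyRange 0 ((if t then pvDval c else 9) + 1) 1) (0, cache) hval
      have hv : ((PySem.List.pyRange 0 ((if t then pvDval c else 9) + 1) 1).foldl
          (fun (acc : Int × PySem.Dict (Int × Bool × Bool) Int) digit =>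
            if digit == f && !(l && digit == 0) then acc
            else
              let r := pvDpAMemo f rest (t && digit == (if t then pvDval c else 9)) (l && digit == 0) acc.2
              (acc.1 + r.1, r.2)) (0, cache)).1 = pvDpA f (c :: rest) t l := by
        rw [h1, pvDpA]
      refine ⟨hv, ?_⟩
      intro r' t' l' v' hsuf' hget
      by_cases hk : ((r'.length : Int), t', l') = ((((c :: rest).length : Nat) : Int), t, l)
      · obtain ⟨hk1, rfl, rfl⟩ : ((r'.length : Int) = (((c :: rest).length : Nat) : Int)) ∧ t' = t ∧ l' = l := by
          simpa [Prod.ext_iff] using hk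
        have hr' : r' = c :: rest := pvSuffix_eq_of_length hsuf' hsuf (by exact_mod_cast hk1)
        rw [hr', PySem.Dict.get?_insert_self] at hget
        cases hget
        rw [hr']
        simpa using hv
      · rw [PySem.Dict.get?_insert_of_ne _ _ hk] at hget
        exact h2 r' t' l' v' hsuf' hget

theorem pvMain (N f : Int) (hpre : 0 ≤ N) :
    count_without_digit N f = count_without_digit_alt N f := by
  rw [count_without_digit,
    (pvDpAMemo_correct f (PySem.Int.toChars N) (PySem.Int.toChars N) List.suffix_rfl true true
      PySem.Dict.empty (by intro r t l v _ hget; rw [PySem.Dict.get?_empty] at hget; cases hget)).1]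
  by_cases hN : N = 0
  · subst hN
    have h0 : PySem.Int.toChars 0 = ['0'] := rfl
    rw [count_without_digit_alt, h0]
    simp only [show ((0:Int) == 0) = true from rfl, if_true]
    rw [pvDpA]
    simp only [if_true, show pvDval '0' = 0 from rfl,
      show PySem.List.pyRange 0 (0+1) 1 = [0] from PySem.List.pyRange_one_singleton 0,
      List.foldl_cons, List.foldl_nil]
    simp [pvDpA]
  · have hN0 : 0 < N := by omega
    have hchars := pvToChars_eq N hpre
    obtain ⟨d, rest, hshape, hd1, hd9⟩ := pvDigits_shape N.toNat (by omega)
    have hall : ∀ e ∈ d :: rest, e < 10 := by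
      rw [← hshape]; exact pvDigits_lt N.toNat
    rw [hshape] at hchars
    rw [count_without_digit_alt, hchars]
    have hne : (N == 0) = false := by simp; omega
    rw [hne]
    simp only [if_neg (by decide : ¬(false = true))]
    have hds : (((d :: rest).map Nat.digitChar).map pvDval) = (d :: rest).map (Nat.cast : Nat → Int) := by
      rw [List.map_map]
      apply List.map_congr_left
      intro e he
      simp only [Function.comp_apply]
      exact pvDval_digitChar e (hall e he)
    rw [hds]
    rw [show (if 0 ≤ f ∧ f ≤ 9 then (9:Int) else 10) = pvA f from rfl]
    rw [show (if (0 ≤ f ∧ f ≤ 9) ∧ f ≠ 0 then pvA f - 1 else 9) = pvLead f from rfl]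
    rw [pvDpA_root f d rest hd1 hd9 (fun e he => hall e (by simp [he]))]
    have hlen : ((((d :: rest).map (Nat.cast : Nat → Int)).length : Int)) = 1 + (rest.length : Int) := by
      simp; ring
    rw [hlen, pvLoop1]

-- ===== VERDICT (by name: the statement is the Claim_ definition above) =====
theorem count_without_digit_spec : Claim_equal_count_without_digit := by
  intro N f _ hpre
  unfold Spec_count_without_digit
  exact pvMain N f hpre
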